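-- pv_equiv track=rewrite | github.com/ericcombiolab/dynDeepDRIM | Utility_folder/Gene_pairs_generation_for_functionalAnnotation/function_assign_dataprocess.py | Generate_train_genepair_label
-- ===== SOURCE A (Python) =====
-- def Generate_train_genepair_label(train_known,train_unknown,n_train):
--     G1=[]
--     G2=[]
--     label = []
--     for i in range(n_train):
--         GeneA = train_known[i]
--         for j in range(n_train):
--             GeneB = train_known[j]
--             GeneC = train_unknown[j]
--             G1.append(GeneA)
--             G2.append(GeneB)
--             label.append('1')
--             G1.append(GeneA)
--             G2.append(GeneC)
--             label.append('0')
--     return G1,G2,label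
-- ===== SOURCE B (Python) =====
-- def Generate_train_genepair_label(train_known, train_unknown, n_train):
--     n = max(n_train, 0)
--     G2_block = []
--     for j in range(n):
--         G2_block += [train_known[j], train_unknown[j]]
--     G1 = [g for i in range(n) for g in [train_known[i]] * (2 * n)]
--     return G1, G2_block * n, ['1', '0'] * (n * n)
-- ===== Notes on version B (the rewrite author's own statement) =====
-- stated objective: simpler
-- what changed: Replaces the triple-interleaved nested append loop with independent block construction: one pass builds the interleaved known/unknown block, and G2 and the label list are produced by list replication (* n) while G1 is a flat comprehension of per-gene repetitions.
import Mathlib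
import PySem

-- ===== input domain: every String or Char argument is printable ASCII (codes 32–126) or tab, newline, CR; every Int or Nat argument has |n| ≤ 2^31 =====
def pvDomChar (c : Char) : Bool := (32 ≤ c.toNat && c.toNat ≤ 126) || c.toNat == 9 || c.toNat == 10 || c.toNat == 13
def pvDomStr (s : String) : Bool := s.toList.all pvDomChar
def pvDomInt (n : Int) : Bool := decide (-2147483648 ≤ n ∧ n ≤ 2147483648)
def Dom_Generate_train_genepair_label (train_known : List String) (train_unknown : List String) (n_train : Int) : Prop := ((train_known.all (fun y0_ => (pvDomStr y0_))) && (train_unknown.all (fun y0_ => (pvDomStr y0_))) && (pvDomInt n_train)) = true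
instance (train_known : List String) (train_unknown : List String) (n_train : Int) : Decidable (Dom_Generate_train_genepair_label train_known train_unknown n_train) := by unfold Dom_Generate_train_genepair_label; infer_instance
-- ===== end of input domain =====

-- ===== PORT A =====
-- B builds the output by block construction and list replication instead of A's nested
-- append loop (objective: simpler). Pre_ excludes inputs where A raises IndexError.
def Generate_train_genepair_label (train_known : List String) (train_unknown : List String) (n_train : Int) : List String × List String × List String :=
  (PySem.List.pyRange 0 n_train 1).foldl
    (fun (s : List String × List String × List String) i =>
      let GeneA := PySem.List.pyGetD train_known i ""
      (PySem.List.pyRange 0 n_train 1).foldl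
        (fun (s : List String × List String × List String) j =>
          let GeneB := PySem.List.pyGetD train_known j ""
          let GeneC := PySem.List.pyGetD train_unknown j ""
          (s.1 ++ [GeneA] ++ [GeneA], s.2.1 ++ [GeneB] ++ [GeneC], s.2.2 ++ ["1"] ++ ["0"]))
        s)
    ([], [], [])

-- ===== PORT B =====
def Generate_train_genepair_label_alt (train_known : List String) (train_unknown : List String) (n_train : Int) : List String × List String × List String :=
  let n : Int := max n_train 0   -- n = max(n_train, 0)
  let G2_block := (PySem.List.pyRange 0 n 1).foldl
    (fun acc j => acc ++ [PySem.List.pyGetD train_known j "", PySem.List.pyGetD train_unknown j ""]) []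
  let G1 := (PySem.List.pyRange 0 n 1).flatMap
    (fun i => List.replicate (2 * n).toNat (PySem.List.pyGetD train_known i ""))
  (G1, (List.replicate n.toNat G2_block).flatten, (List.replicate (n * n).toNat ["1", "0"]).flatten)

-- ===== PRECONDITION & SPEC =====
-- Pre_: A indexes train_known[i], train_unknown[j] for 0 ≤ i,j < n_train and raises
-- IndexError when n_train exceeds either length; those inputs are excluded.
def Pre_Generate_train_genepair_label (train_known : List String) (train_unknown : List String) (n_train : Int) : Prop :=
  n_train ≤ (train_known.length : Int) ∧ n_train ≤ (train_unknown.length : Int)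
instance (train_known : List String) (train_unknown : List String) (n_train : Int) : Decidable (Pre_Generate_train_genepair_label train_known train_unknown n_train) := by unfold Pre_Generate_train_genepair_label; infer_instance
def pvWitness_Generate_train_genepair_label : List String × List String × Int := (["a", "b"], ["x", "y"], 2)
def Spec_Generate_train_genepair_label (train_known : List String) (train_unknown : List String) (n_train : Int) (out : List String × List String × List String) : Prop := out = Generate_train_genepair_label_alt train_known train_unknown n_train
instance (train_known : List String) (train_unknown : List String) (n_train : Int) (out : List String × List String × List String) : Decidable (Spec_Generate_train_genepair_label train_known train_unknown n_train out) := by unfold Spec_Generate_train_genepair_label; infer_instance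

-- ===== CLAIM (what is proved, stated in full; the proofs are below) =====
def Claim_equal_Generate_train_genepair_label : Prop := ∀ (train_known : List String) (train_unknown : List String) (n_train : Int), Dom_Generate_train_genepair_label train_known train_unknown n_train → Pre_Generate_train_genepair_label train_known train_unknown n_train → Spec_Generate_train_genepair_label train_known train_unknown n_train (Generate_train_genepair_label train_known train_unknown n_train)

-- ===== LEMMAS AND PROOFS =====

-- A's inner loop only appends: it decomposes into three flatMaps.
theorem pv_inner (tk tu : List String) (A : String) :
    ∀ (l : List Int) (s : List String × List String × List String),
      l.foldl (fun s j =>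
          let GeneB := PySem.List.pyGetD tk j ""
          let GeneC := PySem.List.pyGetD tu j ""
          (s.1 ++ [A] ++ [A], s.2.1 ++ [GeneB] ++ [GeneC], s.2.2 ++ ["1"] ++ ["0"])) s
        = (s.1 ++ l.flatMap (fun _ => [A, A]),
           s.2.1 ++ l.flatMap (fun j => [PySem.List.pyGetD tk j "", PySem.List.pyGetD tu j ""]),
           s.2.2 ++ l.flatMap (fun _ => ["1", "0"])) := by
  intro l
  induction l with
  | nil => intro s; simp
  | cons x t ih => intro s; rw [List.foldl_cons, ih]; simp

-- A's outer loop likewise, with the inner loop already characterised.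
theorem pv_outer (tk tu : List String) (R0 : List Int) :
    ∀ (l : List Int) (s : List String × List String × List String),
      l.foldl (fun s i =>
          let GeneA := PySem.List.pyGetD tk i ""
          R0.foldl (fun s j =>
              let GeneB := PySem.List.pyGetD tk j ""
              let GeneC := PySem.List.pyGetD tu j ""
              (s.1 ++ [GeneA] ++ [GeneA], s.2.1 ++ [GeneB] ++ [GeneC], s.2.2 ++ ["1"] ++ ["0"])) s) s
        = (s.1 ++ l.flatMap (fun i => R0.flatMap (fun _ => [PySem.List.pyGetD tk i "", PySem.List.pyGetD tk i ""])),
           s.2.1 ++ l.flatMap (fun _ => R0.flatMap (fun j => [PySem.List.pyGetD tk j "", PySem.List.pyGetD tu j ""])),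
           s.2.2 ++ l.flatMap (fun _ => R0.flatMap (fun _ => ["1", "0"]))) := by
  intro l
  induction l with
  | nil => intro s; simp
  | cons x t ih =>
      intro s
      rw [List.foldl_cons, ih]
      simp only [pv_inner]
      simp

theorem pv_flatMap_const {α : Type} (l : List α) (c : List String) :
    l.flatMap (fun _ => c) = (List.replicate l.length c).flatten := by
  induction l with
  | nil => simp
  | cons a t ih => simp [ih, List.replicate_succ]

theorem pv_flatMap_congr {α : Type} (l : List α) (f g : α → List String)
    (h : ∀ a ∈ l, f a = g a) : l.flatMap f = l.flatMap g := by
  induction l with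
  | nil => simp
  | cons a t ih =>
      simp only [List.flatMap_cons]
      rw [h a (by simp), ih (fun a ha => h a (by simp [ha]))]

theorem pv_flatten_replicate_pair (k : Nat) (x : String) :
    (List.replicate k [x, x]).flatten = List.replicate (2 * k) x := by
  induction k with
  | zero => simp
  | succ m ih =>
      have h2 : 2 * (m + 1) = 2 * m + 2 := by omega
      simp [List.replicate_succ, ih, h2]

theorem pv_flatten_replicate_mul (a b : Nat) (c : List String) :
    (List.replicate a (List.replicate b c).flatten).flatten
      = (List.replicate (a * b) c).flatten := by
  induction a with
  | zero => simp
  | succ m ih =>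
      have h : (m + 1) * b = b + m * b := by ring
      rw [List.replicate_succ, List.flatten_cons, ih, h, List.replicate_add, List.flatten_append]

theorem pv_foldl_append_pairs (tk tu : List String) :
    ∀ (l : List Int) (acc : List String),
      l.foldl (fun acc j => acc ++ [PySem.List.pyGetD tk j "", PySem.List.pyGetD tu j ""]) acc
        = acc ++ l.flatMap (fun j => [PySem.List.pyGetD tk j "", PySem.List.pyGetD tu j ""]) := by
  intro l
  induction l with
  | nil => intro acc; simp
  | cons a t ih => intro acc; rw [List.foldl_cons, ih]; simp

theorem Generate_train_genepair_label_eq (train_known train_unknown : List String) (n_train : Int) :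
    Generate_train_genepair_label train_known train_unknown n_train
      = Generate_train_genepair_label_alt train_known train_unknown n_train := by
  unfold Generate_train_genepair_label Generate_train_genepair_label_alt
  have hN : (0 : Int) ≤ max n_train 0 := le_max_right _ _
  have hR : PySem.List.pyRange 0 n_train 1 = PySem.List.pyRange 0 (max n_train 0) 1 := by
    rcases (by omega : n_train ≤ 0 ∨ 0 < n_train) with h | h
    · rw [PySem.List.pyRange_one_eq_nil h, PySem.List.pyRange_one_eq_nil (by omega)]
    · rw [max_eq_left (by omega)]
  have hlen : (PySem.List.pyRange 0 (max n_train 0) 1).length = (max n_train 0).toNat := by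
    rw [PySem.List.length_pyRange_one]; omega
  rw [hR, pv_outer]
  simp only [pv_foldl_append_pairs, List.nil_append, Prod.mk.injEq]
  refine ⟨?_, ?_, ?_⟩
  · refine pv_flatMap_congr _ _ _ (fun i _ => ?_)
    rw [pv_flatMap_const, hlen, pv_flatten_replicate_pair]
    congr 1
    omega
  · rw [pv_flatMap_const, hlen]
  · rw [pv_flatMap_const (PySem.List.pyRange 0 (max n_train 0) 1) ["1", "0"], hlen]
    rw [pv_flatMap_const (PySem.List.pyRange 0 (max n_train 0) 1)
          ((List.replicate (max n_train 0).toNat ["1", "0"]).flatten), hlen,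
        pv_flatten_replicate_mul]
    congr 1
    obtain ⟨k, hk⟩ := Int.eq_ofNat_of_zero_le hN
    rw [hk, ← Nat.cast_mul, Int.toNat_natCast, Int.toNat_natCast]

-- ===== VERDICT (by name: the statement is the Claim_ definition above) =====
theorem Generate_train_genepair_label_spec : Claim_equal_Generate_train_genepair_label := by
  intro tk tu n _ _
  unfold Spec_Generate_train_genepair_label
  exact Generate_train_genepair_label_eq tk tu n
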